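-- pv_equiv track=rewrite | github.com/vromanuk/leetcode-problems | solutions/1652_defuse_the_bomb.py | decrypt_prefix_sum
-- ===== SOURCE A (Python) =====
-- def decrypt_prefix_sum(code: list[int], k: int) -> list[int]:
--     if not code:
--         return []
--
--     if k == 0:
--         return [0] * len(code)
--
--     prefix_sum = [0]
--
--     for c in code:
--         prefix_sum.append(c + prefix_sum[-1])
--
--     n = len(code)
--     result = [0] * n
--
--     for i in range(n):
--         if k > 0:
--             """
--             Example:
--             code:       [3, 1, 4, 2]
--             prefix_sum: [0, 3, 4, 8, 10]
--             k = 2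
--
--             For i = 0:
--             - We need the sum of the next k elements (wrapping if needed)
--             - end_index = (0 + 2) % 4 = 2
--             - result[0] = prefix_sum[end_index + 1] - prefix_sum[i + 1]
--                        = prefix_sum[3] - prefix_sum[1] = 8 - 3 = 5
--
--             Visually:
--             [3, 1, 4, 2]  (original array)
--              0  1  2  3   (indices)
--                 [sum]     (range from i+1 to end_index)
--
--             We're summing:
--             (1 + 4) = 5
--
--             For i = 3 (example of circular case):
--             - end_index = (3 + 2) % 4 = 1
--             - Since end_index < i, we wrap around the array
--             - result[3] = (prefix_sum[n] - prefix_sum[i+1]) + prefix_sum[end_index+1]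
--                        = (prefix_sum[4] - prefix_sum[4]) + prefix_sum[2]
--                        = (10 - 10) + 4 = 4
--
--             Visually:
--             [3, 1, 4, 2]  (original array)
--              0  1  2  3   (indices)
--              [s]      [s] (sum wraps around)
--
--             We're summing:
--             (3 + 1) = 4
--               ^     ^
--               |     |
--             index 0 index 1 (after wrapping)
--             """
--             end_index = (i + k) % n
--
--             if end_index > i:
--                 result[i] = prefix_sum[end_index + 1] - prefix_sum[i + 1]
--             else:
--                 result[i] = (prefix_sum[n] - prefix_sum[i + 1]) + (
--                     prefix_sum[end_index + 1]
--                 )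
--         else:
--             start_index = (i + k) % n
--
--             if start_index < i:
--                 result[i] = prefix_sum[i] - prefix_sum[start_index]
--             else:
--                 result[i] = (prefix_sum[i] + prefix_sum[n]) - prefix_sum[start_index]
--
--     return result
-- ===== SOURCE B (Python) =====
-- def decrypt_prefix_sum(code: list[int], k: int) -> list[int]:
--     if not code:
--         return []
--     n = len(code)
--     result = []
--     for i in range(n):
--         s = 0
--         if k > 0:
--             for j in range(1, k + 1):
--                 s += code[(i + j) % n]
--         else:
--             for j in range(1, -k + 1):
--                 s += code[(i - j) % n]
--         result.append(s)
--     return result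
-- ===== Notes on version B (the rewrite author's own statement) =====
-- stated objective: simpler
-- what changed: Replaces A's prefix-sum table plus wrap-around index arithmetic by a direct scan that, for each position, sums the next (or previous) |k| elements with a modular index.
-- outside the precondition, e.g. on decrypt_prefix_sum([1, 2], 5): A returns [2, 1], B returns [8, 7]; on decrypt_prefix_sum([1, 2], -5): A returns [2, 1], B returns [8, 7]
import Mathlib
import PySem

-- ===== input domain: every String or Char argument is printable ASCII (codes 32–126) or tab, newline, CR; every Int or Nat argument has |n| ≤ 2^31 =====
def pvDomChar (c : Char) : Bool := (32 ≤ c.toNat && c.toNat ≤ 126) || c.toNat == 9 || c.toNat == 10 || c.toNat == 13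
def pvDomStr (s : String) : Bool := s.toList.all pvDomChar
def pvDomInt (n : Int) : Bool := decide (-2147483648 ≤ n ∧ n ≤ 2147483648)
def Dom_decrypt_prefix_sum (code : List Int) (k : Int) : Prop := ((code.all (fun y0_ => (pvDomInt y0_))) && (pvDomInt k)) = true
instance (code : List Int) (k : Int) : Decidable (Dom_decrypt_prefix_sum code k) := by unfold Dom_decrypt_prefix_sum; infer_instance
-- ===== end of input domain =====

-- B replaces A's prefix-sum table and index arithmetic by a direct O(n·|k|) modular scan
-- (objective: simpler); equal to A on |k| ≤ len(code) (the problem's natural domain).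

-- ===== PORT A =====
def decrypt_prefix_sum (code : List Int) (k : Int) : List Int :=
  if code = [] then []
  else if k = 0 then List.replicate code.length 0
  else
    let prefix_sum := code.foldl (fun acc c => acc ++ [c + PySem.List.pyGetD acc (-1) 0]) [0]
    let n : Int := code.length
    let result := List.replicate code.length (0 : Int)
    (PySem.List.pyRange 0 n 1).foldl (fun res i =>
      if k > 0 then
        let end_index := PySem.Int.mod (i + k) n
        if end_index > i then
          PySem.List.pySetD res i
            (PySem.List.pyGetD prefix_sum (end_index + 1) 0 - PySem.List.pyGetD prefix_sum (i + 1) 0)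
        else
          PySem.List.pySetD res i
            ((PySem.List.pyGetD prefix_sum n 0 - PySem.List.pyGetD prefix_sum (i + 1) 0)
              + PySem.List.pyGetD prefix_sum (end_index + 1) 0)
      else
        let start_index := PySem.Int.mod (i + k) n
        if start_index < i then
          PySem.List.pySetD res i
            (PySem.List.pyGetD prefix_sum i 0 - PySem.List.pyGetD prefix_sum start_index 0)
        else
          PySem.List.pySetD res i
            ((PySem.List.pyGetD prefix_sum i 0 + PySem.List.pyGetD prefix_sum n 0)
              - PySem.List.pyGetD prefix_sum start_index 0)) result

-- ===== PORT B =====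
def decrypt_prefix_sum_alt (code : List Int) (k : Int) : List Int :=
  if code = [] then []
  else
    let n : Int := code.length
    (PySem.List.pyRange 0 n 1).foldl (fun result i =>
      result ++ [if k > 0 then
          (PySem.List.pyRange 1 (k + 1) 1).foldl
            (fun s j => s + PySem.List.pyGetD code (PySem.Int.mod (i + j) n) 0) 0
        else
          (PySem.List.pyRange 1 (-k + 1) 1).foldl
            (fun s j => s + PySem.List.pyGetD code (PySem.Int.mod (i - j) n) 0) 0]) []

-- ===== PRECONDITION & SPEC =====
-- Pre_ restricts to the problem's natural domain |k| ≤ len(code) (the original LeetCode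
-- statement guarantees |k| < n): beyond it "sum of the next k elements" wraps more than a full
-- lap and A's prefix-sum reduction and B's literal k-element scan make different defensible
-- choices, which no caller would specify; the empty list is fine for every k (both return []).
def Pre_decrypt_prefix_sum (code : List Int) (k : Int) : Prop :=
  code = [] ∨ (-(code.length : Int) ≤ k ∧ k ≤ (code.length : Int))
instance (code : List Int) (k : Int) : Decidable (Pre_decrypt_prefix_sum code k) := by
  unfold Pre_decrypt_prefix_sum; infer_instance

def pvWitness_decrypt_prefix_sum : List Int × Int := ([3, 1, 4, 2], 2)

def Spec_decrypt_prefix_sum (code : List Int) (k : Int) (out : List Int) : Prop :=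
  out = decrypt_prefix_sum_alt code k
instance (code : List Int) (k : Int) (out : List Int) : Decidable (Spec_decrypt_prefix_sum code k out) := by
  unfold Spec_decrypt_prefix_sum; infer_instance

-- ===== CLAIM (what is proved, stated in full; the proofs are below) =====
def Claim_equal_decrypt_prefix_sum : Prop :=
  ∀ (code : List Int) (k : Int), Dom_decrypt_prefix_sum code k →
    Pre_decrypt_prefix_sum code k →
    Spec_decrypt_prefix_sum code k (decrypt_prefix_sum code k)

-- ===== LEMMAS AND PROOFS =====

-- the prefix-sum list A builds is the table of partial sums
theorem pv_build : ∀ (rest acc : List Int) (s : Int), PySem.List.pyGetD acc (-1) 0 = s →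
    rest.foldl (fun a c => a ++ [c + PySem.List.pyGetD a (-1) 0]) acc
      = acc ++ (List.range rest.length).map (fun t => s + ((rest.take (t+1)).sum)) := by
  intro rest
  induction rest with
  | nil => intro acc s h; simp
  | cons c rest ih =>
    intro acc s h
    have step : (c :: rest).foldl (fun a x => a ++ [x + PySem.List.pyGetD a (-1) 0]) acc
        = rest.foldl (fun a x => a ++ [x + PySem.List.pyGetD a (-1) 0]) (acc ++ [c + s]) := by
      simp [List.foldl_cons, h]
    rw [step, ih (acc ++ [c + s]) (c + s) (PySem.List.pyGetD_neg_one_append_singleton _ _ _)]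
    simp only [List.length_cons, List.range_succ_eq_map, List.map_cons, List.map_map]
    simp [List.append_assoc, Function.comp]
    constructor
    · ring
    · intro t _
      ring

theorem pv_prefix (c : List Int) :
    c.foldl (fun a x => a ++ [x + PySem.List.pyGetD a (-1) 0]) [0]
      = (List.range (c.length + 1)).map (fun t => ((c.take t).sum : Int)) := by
  rw [pv_build c [0] 0 (by decide)]
  simp only [List.range_succ_eq_map, List.map_cons, List.map_map]
  simp [Function.comp]

theorem pv_Pval (c : List Int) (t : Nat) (h : t ≤ c.length) :
    PySem.List.pyGetD ((List.range (c.length + 1)).map (fun u => ((c.take u).sum : Int))) (t : Int) 0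
      = (c.take t).sum := by
  rw [PySem.List.pyGetD_natCast]
  exact PySem.List.getD_map_range _ _ _ _ (by omega)

-- a loop that sets slot i to f i over range 0..n is a map over that range
theorem pv_set_loop (f : Int → Int) : ∀ (m a b : Nat), a + m = b → ∀ (res : List Int), res.length = b →
    (PySem.List.pyRange (a : Int) (b : Int) 1).foldl (fun r i => PySem.List.pySetD r i (f i)) res
      = res.take a ++ (PySem.List.pyRange (a : Int) (b : Int) 1).map f := by
  intro m
  induction m with
  | zero =>
    intro a b hab res hres
    rw [PySem.List.pyRange_one_eq_nil (by omega : (b:Int) ≤ (a:Int))]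
    simp [List.take_of_length_le (by omega : res.length ≤ a)]
  | succ m ih =>
    intro a b hab res hres
    rw [PySem.List.pyRange_one_cons (by exact_mod_cast (by omega : (a:Int) < (b:Int)))]
    simp only [List.foldl_cons, List.map_cons]
    rw [PySem.List.pySetD_natCast]
    have hcast : ((a : Int) + 1) = (((a + 1 : Nat)) : Int) := by push_cast; ring
    rw [hcast, ih (a+1) b (by omega) _ (by simp [hres])]
    have hx : a < res.length := by omega
    rw [List.take_add_one]
    have : (res.set a (f ↑a)).take a = res.take a := List.take_set_of_le (Nat.le_refl a)
    rw [this]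
    simp [hx]

theorem pv_sum_asc (c : List Int) : ∀ (m a : Nat), a + m ≤ c.length →
    ((List.range m).map (fun t => c.getD (a + t) 0)).sum = (c.take (a + m)).sum - (c.take a).sum := by
  intro m
  induction m with
  | zero => intro a _; simp
  | succ m ih =>
    intro a h
    rw [List.range_succ, List.map_append, List.sum_append]
    have hlt : a + m < c.length := by omega
    rw [ih a (by omega)]
    simp only [List.map_cons, List.map_nil, List.sum_cons, List.sum_nil]
    rw [List.getD_eq_getElem c 0 hlt]
    have := List.sum_take_succ c (a+m) hlt
    rw [← Nat.add_assoc]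
    omega

theorem pv_sum_desc (c : List Int) : ∀ (m a : Nat), a + m ≤ c.length →
    ((List.range m).map (fun t => c.getD (a + m - 1 - t) 0)).sum
      = (c.take (a + m)).sum - (c.take a).sum := by
  intro m
  induction m with
  | zero => intro a _; simp
  | succ m ih =>
    intro a h
    rw [List.range_succ_eq_map, List.map_cons, List.map_map, List.sum_cons]
    have e1 : a + (m + 1) - 1 - 0 = a + m := by omega
    have e2 : ((List.range m).map ((fun t => c.getD (a + (m + 1) - 1 - t) 0) ∘ Nat.succ))
        = (List.range m).map (fun t => c.getD (a + m - 1 - t) 0) := by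
      apply List.map_congr_left
      intro t _
      simp only [Function.comp]
      congr 1
      omega
    rw [e1, e2, ih a (by omega)]
    have hlt : a + m < c.length := by omega
    rw [List.getD_eq_getElem c 0 hlt]
    have := List.sum_take_succ c (a+m) hlt
    rw [← Nat.add_assoc]
    omega

theorem pv_mod_lo (x n : Int) (h0 : 0 ≤ x) (h1 : x < n) : PySem.Int.mod x n = x := by
  rw [PySem.Int.mod_eq_emod_of_pos (by omega)]; exact Int.emod_eq_of_lt h0 h1

theorem pv_mod_hi (x n : Int) (h0 : n ≤ x) (h1 : x < 2 * n) : PySem.Int.mod x n = x - n := by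
  rw [PySem.Int.mod_eq_emod_of_pos (by omega), ← Int.sub_emod_right x n]
  exact Int.emod_eq_of_lt (by omega) (by omega)

theorem pv_mod_neg (x n : Int) (hn : 0 < n) (h0 : -n ≤ x) (h1 : x < 0) : PySem.Int.mod x n = x + n := by
  rw [PySem.Int.mod_eq_emod_of_pos hn, ← Int.add_emod_right x n]
  exact Int.emod_eq_of_lt (by omega) (by omega)

-- pointwise agreement of A's prefix-sum formula with B's modular scan, k > 0
theorem pv_point_pos (c : List Int) (k : Int) (i : Nat) (hi : i < c.length)
    (hk1 : 1 ≤ k) (hk2 : k ≤ (c.length : Int)) :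
    (if PySem.Int.mod ((i : Int) + k) (c.length : Int) > (i : Int) then
        PySem.List.pyGetD ((List.range (c.length + 1)).map (fun u => ((c.take u).sum : Int)))
            (PySem.Int.mod ((i : Int) + k) (c.length : Int) + 1) 0
          - PySem.List.pyGetD ((List.range (c.length + 1)).map (fun u => ((c.take u).sum : Int)))
            ((i : Int) + 1) 0
      else
        (PySem.List.pyGetD ((List.range (c.length + 1)).map (fun u => ((c.take u).sum : Int)))
            ((c.length : Int)) 0
          - PySem.List.pyGetD ((List.range (c.length + 1)).map (fun u => ((c.take u).sum : Int)))
            ((i : Int) + 1) 0)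
          + PySem.List.pyGetD ((List.range (c.length + 1)).map (fun u => ((c.take u).sum : Int)))
            (PySem.Int.mod ((i : Int) + k) (c.length : Int) + 1) 0)
    = (PySem.List.pyRange 1 (k + 1) 1).foldl
        (fun s j => s + PySem.List.pyGetD c (PySem.Int.mod ((i : Int) + j) (c.length : Int)) 0) 0 := by
  have hkN : k = (k.toNat : Int) := (Int.toNat_of_nonneg (by omega)).symm
  have hkNle : k.toNat ≤ c.length := by omega
  have hkN1 : 1 ≤ k.toNat := by omega
  rw [PySem.List.foldl_add, PySem.List.pyRange_one 1 (k+1), List.map_map]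
  have hrange : (k + 1 - 1).toNat = k.toNat := by omega
  rw [hrange]
  have hcast : ((i:Int) + 1) = (((i + 1 : Nat)) : Int) := by push_cast; ring
  by_cases hwrap : (i : Int) + k < (c.length : Int)
  · -- no wrap
    have he : PySem.Int.mod ((i:Int) + k) (c.length:Int) = (i:Int) + k :=
      pv_mod_lo _ _ (by omega) hwrap
    rw [he, if_pos (by omega)]
    have hcast2 : ((i:Int) + k + 1) = (((i + k.toNat + 1 : Nat)) : Int) := by push_cast; omega
    rw [hcast, hcast2, pv_Pval c (i + k.toNat + 1) (by omega), pv_Pval c (i + 1) (by omega)]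
    have hmap : (List.range k.toNat).map
        ((fun j => PySem.List.pyGetD c (PySem.Int.mod ((i:Int) + j) (c.length:Int)) 0) ∘ (fun (t : Nat) => (1:Int) + (t:Int)))
        = (List.range k.toNat).map (fun t => c.getD ((i + 1) + t) 0) := by
      apply List.map_congr_left
      intro t ht
      rw [List.mem_range] at ht
      simp only [Function.comp_apply]
      have harg : ((i:Int) + ((1:Int) + (t:Int))) = (((i + 1 + t : Nat)) : Int) := by push_cast; ring
      rw [harg, pv_mod_lo _ _ (by omega) (by omega), PySem.List.pyGetD_natCast]
    rw [hmap, pv_sum_asc c k.toNat (i+1) (by omega)]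
    have : i + 1 + k.toNat = i + k.toNat + 1 := by omega
    rw [this]
    omega
  · -- wrap
    have hn : (0:Int) < (c.length:Int) := by omega
    have he : PySem.Int.mod ((i:Int) + k) (c.length:Int) = (i:Int) + k - (c.length:Int) :=
      pv_mod_hi _ _ (by omega) (by omega)
    rw [he, if_neg (by omega)]
    have hcast2 : ((i:Int) + k - (c.length:Int) + 1) = (((i + k.toNat + 1 - c.length : Nat)) : Int) := by
      push_cast [Int.toNat_of_nonneg]; omega
    have hcast3 : ((c.length : Int)) = (((c.length : Nat)) : Int) := rfl
    rw [hcast, hcast2, pv_Pval c (i + k.toNat + 1 - c.length) (by omega),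
        pv_Pval c (i + 1) (by omega), pv_Pval c c.length (by omega)]
    -- split the scan at the wrap point
    set m1 := c.length - 1 - i with hm1
    set m2 := i + k.toNat + 1 - c.length with hm2
    have hsplit : k.toNat = m1 + m2 := by omega
    rw [hsplit, List.range_add, List.map_append, List.sum_append]
    have hmapA : (List.range m1).map
        ((fun j => PySem.List.pyGetD c (PySem.Int.mod ((i:Int) + j) (c.length:Int)) 0) ∘ (fun (t : Nat) => (1:Int) + (t:Int)))
        = (List.range m1).map (fun t => c.getD ((i + 1) + t) 0) := by
      apply List.map_congr_left
      intro t ht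
      rw [List.mem_range] at ht
      simp only [Function.comp_apply]
      have harg : ((i:Int) + ((1:Int) + (t:Int))) = (((i + 1 + t : Nat)) : Int) := by push_cast; ring
      rw [harg, pv_mod_lo _ _ (by omega) (by omega), PySem.List.pyGetD_natCast]
    have hmapB : (List.range m2).map
        (((fun j => PySem.List.pyGetD c (PySem.Int.mod ((i:Int) + j) (c.length:Int)) 0) ∘ (fun (t : Nat) => (1:Int) + (t:Int))) ∘ (fun (t : Nat) => m1 + t))
        = (List.range m2).map (fun t => c.getD (0 + t) 0) := by
      apply List.map_congr_left
      intro t ht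
      rw [List.mem_range] at ht
      simp only [Function.comp_apply]
      have harg : ((i:Int) + ((1:Int) + ((m1 + t : Nat):Int))) = ((c.length:Int)) + (t:Int) := by push_cast; omega
      rw [harg, pv_mod_hi _ _ (by omega) (by omega)]
      have harg2 : ((c.length:Int)) + (t:Int) - (c.length:Int) = (((0 + t : Nat)):Int) := by push_cast; ring
      rw [harg2, PySem.List.pyGetD_natCast]
    rw [List.map_map, hmapA, hmapB, pv_sum_asc c m1 (i+1) (by omega), pv_sum_asc c m2 0 (by omega)]
    have e1 : i + 1 + m1 = c.length := by omega
    have e2 : 0 + m2 = m2 := by omega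
    rw [e1, e2]
    simp only [List.take_zero, List.sum_nil, List.take_length]
    omega

-- pointwise agreement, k < 0
theorem pv_point_neg (c : List Int) (k : Int) (i : Nat) (hi : i < c.length)
    (hk1 : k ≤ -1) (hk2 : -(c.length : Int) ≤ k) :
    (if PySem.Int.mod ((i : Int) + k) (c.length : Int) < (i : Int) then
        PySem.List.pyGetD ((List.range (c.length + 1)).map (fun u => ((c.take u).sum : Int)))
            ((i : Int)) 0
          - PySem.List.pyGetD ((List.range (c.length + 1)).map (fun u => ((c.take u).sum : Int)))
            (PySem.Int.mod ((i : Int) + k) (c.length : Int)) 0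
      else
        (PySem.List.pyGetD ((List.range (c.length + 1)).map (fun u => ((c.take u).sum : Int)))
            ((i : Int)) 0
          + PySem.List.pyGetD ((List.range (c.length + 1)).map (fun u => ((c.take u).sum : Int)))
            ((c.length : Int)) 0)
          - PySem.List.pyGetD ((List.range (c.length + 1)).map (fun u => ((c.take u).sum : Int)))
            (PySem.Int.mod ((i : Int) + k) (c.length : Int)) 0)
    = (PySem.List.pyRange 1 (-k + 1) 1).foldl
        (fun s j => s + PySem.List.pyGetD c (PySem.Int.mod ((i : Int) - j) (c.length : Int)) 0) 0 := by
  obtain ⟨q, hq⟩ : ∃ q : Nat, (q : Int) = -k := ⟨(-k).toNat, by omega⟩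
  have hqle : q ≤ c.length := by omega
  have hq1 : 1 ≤ q := by omega
  have hn : (0:Int) < (c.length:Int) := by omega
  rw [PySem.List.foldl_add, PySem.List.pyRange_one 1 (-k+1), List.map_map]
  have hrange : (-k + 1 - 1).toNat = q := by omega
  rw [hrange]
  have hki : (i : Int) + k = (i : Int) - (q : Int) := by omega
  by_cases hwrap : q ≤ i
  · -- no wrap around index 0
    have hs : PySem.Int.mod ((i:Int) + k) (c.length:Int) = (((i - q : Nat)) : Int) := by
      rw [hki, pv_mod_lo _ _ (by omega) (by omega)]; push_cast; omega
    rw [hs, if_pos (by push_cast; omega)]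
    rw [pv_Pval c i (by omega), pv_Pval c (i - q) (by omega)]
    have hmap : (List.range q).map
        ((fun j => PySem.List.pyGetD c (PySem.Int.mod ((i:Int) - j) (c.length:Int)) 0) ∘ (fun (t : Nat) => (1:Int) + (t:Int)))
        = (List.range q).map (fun t => c.getD (i - q + q - 1 - t) 0) := by
      apply List.map_congr_left
      intro t ht
      rw [List.mem_range] at ht
      simp only [Function.comp_apply]
      have harg : ((i:Int) - ((1:Int) + (t:Int))) = (((i - q + q - 1 - t : Nat)) : Int) := by push_cast; omega
      rw [harg, pv_mod_lo _ _ (by omega) (by push_cast; omega), PySem.List.pyGetD_natCast]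
    rw [hmap, pv_sum_desc c q (i - q) (by omega)]
    have e1 : i - q + q = i := by omega
    rw [e1]
    omega
  · -- wraps around index 0
    push_neg at hwrap
    have hs : PySem.Int.mod ((i:Int) + k) (c.length:Int) = (((i + c.length - q : Nat)) : Int) := by
      rw [hki, pv_mod_neg _ _ hn (by push_cast; omega) (by push_cast; omega)]; push_cast; omega
    rw [hs, if_neg (by push_cast; omega)]
    rw [pv_Pval c i (by omega), pv_Pval c c.length (by omega), pv_Pval c (i + c.length - q) (by omega)]
    have hsplit : q = i + (q - i) := by omega
    rw [hsplit, List.range_add, List.map_append, List.sum_append, List.map_map]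
    have hmapA : (List.range i).map
        ((fun j => PySem.List.pyGetD c (PySem.Int.mod ((i:Int) - j) (c.length:Int)) 0) ∘ (fun (t : Nat) => (1:Int) + (t:Int)))
        = (List.range i).map (fun t => c.getD (0 + i - 1 - t) 0) := by
      apply List.map_congr_left
      intro t ht
      rw [List.mem_range] at ht
      simp only [Function.comp_apply]
      have harg : ((i:Int) - ((1:Int) + (t:Int))) = (((0 + i - 1 - t : Nat)) : Int) := by push_cast; omega
      rw [harg, pv_mod_lo _ _ (by omega) (by push_cast; omega), PySem.List.pyGetD_natCast]
    have hmapB : (List.range (q - i)).map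
        (((fun j => PySem.List.pyGetD c (PySem.Int.mod ((i:Int) - j) (c.length:Int)) 0) ∘ (fun (t : Nat) => (1:Int) + (t:Int))) ∘ (fun (t : Nat) => i + t))
        = (List.range (q - i)).map (fun t => c.getD (c.length - (q - i) + (q - i) - 1 - t) 0) := by
      apply List.map_congr_left
      intro t ht
      rw [List.mem_range] at ht
      simp only [Function.comp_apply]
      have harg : ((i:Int) - ((1:Int) + ((i + t : Nat):Int))) = -1 - (t:Int) := by push_cast; ring
      rw [harg, pv_mod_neg _ _ hn (by push_cast; omega) (by omega)]
      have harg2 : (-1 - (t:Int) + (c.length:Int)) = (((c.length - (q - i) + (q - i) - 1 - t : Nat)):Int) := by push_cast; omega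
      rw [harg2, PySem.List.pyGetD_natCast]
    rw [hmapA, hmapB, pv_sum_desc c i 0 (by omega), pv_sum_desc c (q - i) (c.length - (q - i)) (by omega)]
    have e1 : c.length - (q - i) + (q - i) = c.length := by omega
    rw [e1]
    have e4 : i + c.length - (i + (q - i)) = c.length - (q - i) := by omega
    rw [e4]
    simp only [Nat.zero_add, List.take_zero, List.sum_nil, List.take_length]
    omega

-- ===== VERDICT (by name: the statement is the Claim_ definition above) =====
theorem decrypt_prefix_sum_spec : Claim_equal_decrypt_prefix_sum := by
  intro code k _ hpre
  unfold Spec_decrypt_prefix_sum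
  by_cases hc : code = []
  · simp [decrypt_prefix_sum, decrypt_prefix_sum_alt, hc]
  have hb : -(code.length : Int) ≤ k ∧ k ≤ (code.length : Int) := hpre.resolve_left hc
  have hlen : 0 < code.length := List.length_pos_iff.mpr hc
  by_cases hk0 : k = 0
  · subst hk0
    simp only [decrypt_prefix_sum, decrypt_prefix_sum_alt, if_neg hc, eq_self_iff_true, if_true]
    have h01 : PySem.List.pyRange 1 (-(0:Int)+1) 1 = [] := by
      rw [PySem.List.pyRange_one_eq_nil (by norm_num)]
    simp only [h01, List.foldl_nil]
    have hif : (fun (result : List Int) (i : Int) =>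
        result ++ [if (0:Int) > 0 then
            (PySem.List.pyRange 1 ((0:Int) + 1) 1).foldl
              (fun s j => s + PySem.List.pyGetD code (PySem.Int.mod (i + j) (code.length : Int)) 0) 0
          else (0:Int)])
        = (fun result i => result ++ [(fun (_ : Int) => (0:Int)) i]) := by
      funext result i
      norm_num
    rw [hif, PySem.List.foldl_append_singleton_eq_map]
    simp only [List.nil_append, List.map_const']
    rw [PySem.List.length_pyRange_one]
    have hlen0 : ((code.length:Int) - 0).toNat = code.length := by omega
    rw [hlen0]
  by_cases hk : 0 < k
  · -- positive k
    simp only [decrypt_prefix_sum, decrypt_prefix_sum_alt, if_neg hc, if_neg hk0, hk, if_true,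
      gt_iff_lt, decide_true]
    rw [pv_prefix]
    have hbody : (fun (res : List Int) (i : Int) =>
        if (i : Int) < PySem.Int.mod (i + k) (code.length : Int) then
          PySem.List.pySetD res i
            (PySem.List.pyGetD ((List.range (code.length + 1)).map (fun t => ((code.take t).sum : Int))) (PySem.Int.mod (i + k) (code.length : Int) + 1) 0
              - PySem.List.pyGetD ((List.range (code.length + 1)).map (fun t => ((code.take t).sum : Int))) (i + 1) 0)
        else
          PySem.List.pySetD res i
            ((PySem.List.pyGetD ((List.range (code.length + 1)).map (fun t => ((code.take t).sum : Int))) ((code.length : Int)) 0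
              - PySem.List.pyGetD ((List.range (code.length + 1)).map (fun t => ((code.take t).sum : Int))) (i + 1) 0)
              + PySem.List.pyGetD ((List.range (code.length + 1)).map (fun t => ((code.take t).sum : Int))) (PySem.Int.mod (i + k) (code.length : Int) + 1) 0))
        = (fun res i => PySem.List.pySetD res i
            (if (i : Int) < PySem.Int.mod (i + k) (code.length : Int) then
              PySem.List.pyGetD ((List.range (code.length + 1)).map (fun t => ((code.take t).sum : Int))) (PySem.Int.mod (i + k) (code.length : Int) + 1) 0
                - PySem.List.pyGetD ((List.range (code.length + 1)).map (fun t => ((code.take t).sum : Int))) (i + 1) 0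
            else
              (PySem.List.pyGetD ((List.range (code.length + 1)).map (fun t => ((code.take t).sum : Int))) ((code.length : Int)) 0
                - PySem.List.pyGetD ((List.range (code.length + 1)).map (fun t => ((code.take t).sum : Int))) (i + 1) 0)
                + PySem.List.pyGetD ((List.range (code.length + 1)).map (fun t => ((code.take t).sum : Int))) (PySem.Int.mod (i + k) (code.length : Int) + 1) 0)) := by
      funext res i
      split <;> rfl
    rw [hbody]
    rw [show ((0:Int)) = ((0:Nat):Int) from rfl,
        pv_set_loop _ code.length 0 code.length (by omega) _ (by simp)]
    rw [PySem.List.foldl_append_singleton_eq_map]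
    simp only [List.take_zero, List.nil_append, Nat.cast_zero]
    rw [PySem.List.pyRange_zero_natCast, List.map_map, List.map_map]
    apply List.map_congr_left
    intro t ht
    rw [List.mem_range] at ht
    simp only [Function.comp_apply]
    exact pv_point_pos code k t ht (by omega) hb.2
  · -- negative k
    have hkneg : k ≤ -1 := by omega
    simp only [decrypt_prefix_sum, decrypt_prefix_sum_alt, if_neg hc, if_neg hk0, if_neg hk]
    rw [pv_prefix]
    have hbody : (fun (res : List Int) (i : Int) =>
        if PySem.Int.mod (i + k) (code.length : Int) < i then
          PySem.List.pySetD res i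
            (PySem.List.pyGetD ((List.range (code.length + 1)).map (fun t => ((code.take t).sum : Int))) i 0
              - PySem.List.pyGetD ((List.range (code.length + 1)).map (fun t => ((code.take t).sum : Int))) (PySem.Int.mod (i + k) (code.length : Int)) 0)
        else
          PySem.List.pySetD res i
            ((PySem.List.pyGetD ((List.range (code.length + 1)).map (fun t => ((code.take t).sum : Int))) i 0
              + PySem.List.pyGetD ((List.range (code.length + 1)).map (fun t => ((code.take t).sum : Int))) ((code.length : Int)) 0)
              - PySem.List.pyGetD ((List.range (code.length + 1)).map (fun t => ((code.take t).sum : Int))) (PySem.Int.mod (i + k) (code.length : Int)) 0))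
        = (fun res i => PySem.List.pySetD res i
            (if PySem.Int.mod (i + k) (code.length : Int) < i then
              PySem.List.pyGetD ((List.range (code.length + 1)).map (fun t => ((code.take t).sum : Int))) i 0
                - PySem.List.pyGetD ((List.range (code.length + 1)).map (fun t => ((code.take t).sum : Int))) (PySem.Int.mod (i + k) (code.length : Int)) 0
            else
              (PySem.List.pyGetD ((List.range (code.length + 1)).map (fun t => ((code.take t).sum : Int))) i 0
                + PySem.List.pyGetD ((List.range (code.length + 1)).map (fun t => ((code.take t).sum : Int))) ((code.length : Int)) 0)
                - PySem.List.pyGetD ((List.range (code.length + 1)).map (fun t => ((code.take t).sum : Int))) (PySem.Int.mod (i + k) (code.length : Int)) 0)) := by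
      funext res i
      split <;> rfl
    rw [hbody]
    rw [show ((0:Int)) = ((0:Nat):Int) from rfl,
        pv_set_loop _ code.length 0 code.length (by omega) _ (by simp)]
    rw [PySem.List.foldl_append_singleton_eq_map]
    simp only [List.take_zero, List.nil_append, Nat.cast_zero]
    rw [PySem.List.pyRange_zero_natCast, List.map_map, List.map_map]
    apply List.map_congr_left
    intro t ht
    rw [List.mem_range] at ht
    simp only [Function.comp_apply]
    exact pv_point_neg code k t ht hkneg hb.1
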